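-- pv_equiv track=rewrite | github.com/luisemacsel/IA2 | TP1/EJ2 Y 3/Aestrella.py | buscar_posicion
-- ===== SOURCE A (Python) =====
-- def buscar_posicion(value,map, t=True):
--     if value == 0:  # 0 es numero no valido por lo que no retorna nada
--         return (14,0) #base de carga
--     for index,fila in enumerate(map):
--         if value in fila: #fila es la fila entera. index es el numero de la fila donde esta el valor buscado
--             columna = list(fila).index(value)    #columna en la que esta el valor buscado
--             return (index,columna)
--     else: return (0,0)
-- ===== SOURCE B (Python) =====
-- def buscar_posicion(value, map, t=True):
--     if value == 0:  # 0 es numero no valido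
--         return (14, 0)
--     index = {}
--     for i, fila in enumerate(map):
--         for j, cell in enumerate(fila):
--             if cell not in index:
--                 index[cell] = (i, j)
--     return index.get(value, (0, 0))
-- ===== Notes on version B (the rewrite author's own statement) =====
-- stated objective: alternative
-- what changed: Instead of scanning row by row with an early return (membership test then a second .index pass per row), B builds a dict mapping each cell value to its first row-major (row, col) position in one full staged pass over the grid, and then answers with a single dict lookup with default (0, 0).
import Mathlib
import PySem

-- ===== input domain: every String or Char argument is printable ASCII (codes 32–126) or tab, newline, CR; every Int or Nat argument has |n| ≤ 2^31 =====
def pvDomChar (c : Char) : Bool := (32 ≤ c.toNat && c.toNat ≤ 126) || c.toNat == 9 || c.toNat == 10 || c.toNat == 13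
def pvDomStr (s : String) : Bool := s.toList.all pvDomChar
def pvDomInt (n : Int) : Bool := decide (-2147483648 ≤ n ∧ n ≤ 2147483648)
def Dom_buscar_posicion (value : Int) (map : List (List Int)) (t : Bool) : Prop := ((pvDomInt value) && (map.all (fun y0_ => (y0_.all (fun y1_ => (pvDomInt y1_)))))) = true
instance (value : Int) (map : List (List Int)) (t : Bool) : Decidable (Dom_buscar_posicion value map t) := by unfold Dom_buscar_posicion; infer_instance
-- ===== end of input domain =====

-- B replaces A's early-returning row-by-row scan (membership test + second .index pass per row)
-- by a staged pass: build a dict from each cell value to its first row-major position, then one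
-- lookup with default (0, 0) (objective: alternative).

-- ===== PORT A =====
-- A's 'for index,fila in enumerate(map)' loop: check membership, then take list(fila).index(value)
-- (membership guarantees the index exists; .getD 0 is never the default on the taken branch).
def pvAgo (value : Int) : Int → List (List Int) → Int × Int
  | _, [] => (0, 0)
  | i, fila :: rest =>
    if value ∈ fila then (i, ((PySem.List.index? fila value).getD 0 : Nat))
    else pvAgo value (i + 1) rest

def buscar_posicion (value : Int) (map : List (List Int)) (t : Bool) : Int × Int :=
  if value = 0 then (14, 0) else pvAgo value 0 map

-- ===== PORT B =====
-- inner 'for j, cell in enumerate(fila): if cell not in index: index[cell] = (i, j)'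
def pvAddRow (i : Int) : Int → PySem.Dict Int (Int × Int) → List Int → PySem.Dict Int (Int × Int)
  | _, d, [] => d
  | j, d, cell :: rest =>
    pvAddRow i (j + 1) (if d.contains cell then d else d.insert cell (i, j)) rest

-- outer 'for i, fila in enumerate(map)'
def pvBuild : Int → PySem.Dict Int (Int × Int) → List (List Int) → PySem.Dict Int (Int × Int)
  | _, d, [] => d
  | i, d, fila :: rest => pvBuild (i + 1) (pvAddRow i 0 d fila) rest

def buscar_posicion_alt (value : Int) (map : List (List Int)) (t : Bool) : Int × Int :=
  if value = 0 then (14, 0)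
  else (pvBuild 0 PySem.Dict.empty map).getD value (0, 0)

-- ===== PRECONDITION & SPEC =====
def Spec_buscar_posicion (value : Int) (map : List (List Int)) (t : Bool) (out : Int × Int) : Prop := out = buscar_posicion_alt value map t
instance (value : Int) (map : List (List Int)) (t : Bool) (out : Int × Int) : Decidable (Spec_buscar_posicion value map t out) := by unfold Spec_buscar_posicion; infer_instance

-- ===== CLAIM (what is proved, stated in full; the proofs are below) =====
def Claim_equal_buscar_posicion : Prop := ∀ (value : Int) (map : List (List Int)) (t : Bool), Dom_buscar_posicion value map t → Spec_buscar_posicion value map t (buscar_posicion value map t)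

-- ===== LEMMAS AND PROOFS =====

-- first occurrence of value in one row, as an option (proof-side characterisation)
def pvRowOpt (value i : Int) : Int → List Int → Option (Int × Int)
  | _, [] => none
  | j, cell :: rest => if cell = value then some (i, j) else pvRowOpt value i (j + 1) rest

-- first row-major occurrence in the remaining rows
def pvScanOpt (value : Int) : Int → List (List Int) → Option (Int × Int)
  | _, [] => none
  | i, fila :: rest => (pvRowOpt value i 0 fila).or (pvScanOpt value (i + 1) rest)

theorem pvRowOpt_eq (value i : Int) (fila : List Int) : ∀ (j : Int),
    pvRowOpt value i j fila = (List.idxOf? value fila).map (fun k => (i, j + (k : Int))) := by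
  induction fila with
  | nil => intro j; simp [pvRowOpt, List.idxOf?]
  | cons c rest ih =>
    intro j
    rw [pvRowOpt, List.idxOf?_cons, ih]
    by_cases h : c = value
    · simp [h]
    · rw [if_neg h, if_neg (by simp [h] : ¬ (c == value) = true)]
      cases hk : List.idxOf? value rest with
      | none => simp
      | some k => simp; ring

theorem pvAddRow_get? (value i : Int) (fila : List Int) : ∀ (j : Int) (d : PySem.Dict Int (Int × Int)),
    (pvAddRow i j d fila).get? value = (d.get? value).or (pvRowOpt value i j fila) := by
  induction fila with
  | nil => intro j d; simp [pvAddRow, pvRowOpt]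
  | cons cell rest ih =>
    intro j d
    rw [pvAddRow, pvRowOpt, ih]
    by_cases hc : d.contains cell
    · rw [if_pos hc]
      by_cases hv : cell = value
      · subst hv
        have : (d.get? cell).isSome := by
          rw [← PySem.Dict.contains_eq_isSome_get?]; exact hc
        cases hg : d.get? cell with
        | none => rw [hg] at this; simp at this
        | some p => simp [hg]
      · rw [if_neg hv]
    · rw [if_neg hc]
      have hn : d.get? cell = none := by
        cases hg : d.get? cell with
        | none => rfl
        | some p =>
          exfalso; apply hc
          rw [PySem.Dict.contains_eq_isSome_get?, hg]; rfl
      by_cases hv : cell = value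
      · subst hv
        rw [if_pos rfl, PySem.Dict.get?_insert_self, hn]
        simp
      · rw [if_neg hv, PySem.Dict.get?_insert, if_neg (Ne.symm hv)]

theorem pvBuild_get? (value : Int) : ∀ (rows : List (List Int)) (i : Int) (d : PySem.Dict Int (Int × Int)),
    (pvBuild i d rows).get? value = (d.get? value).or (pvScanOpt value i rows) := by
  intro rows
  induction rows with
  | nil => intro i d; simp [pvBuild, pvScanOpt]
  | cons fila rest ih =>
    intro i d
    rw [pvBuild, pvScanOpt, ih, pvAddRow_get?, Option.or_assoc]

theorem pvAgo_eq (value : Int) : ∀ (rows : List (List Int)) (i : Int),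
    pvAgo value i rows = (pvScanOpt value i rows).getD (0, 0) := by
  intro rows
  induction rows with
  | nil => intro i; rfl
  | cons fila rest ih =>
    intro i
    rw [pvAgo, pvScanOpt, pvRowOpt_eq]
    by_cases h : value ∈ fila
    · rw [if_pos h]
      rcases Option.isSome_iff_exists.mp (List.isSome_idxOf?.mpr h) with ⟨k, hk⟩
      simp [hk]
    · rw [if_neg h, List.idxOf?_eq_none_iff.mpr h]
      simp [ih]

-- ===== VERDICT (by name: the statement is the Claim_ definition above) =====
theorem buscar_posicion_spec : Claim_equal_buscar_posicion := by
  intro value map t _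
  unfold Spec_buscar_posicion buscar_posicion buscar_posicion_alt
  by_cases h : value = 0
  · simp [h]
  · rw [if_neg h, if_neg h, PySem.Dict.getD_eq_get?_getD, pvBuild_get?, PySem.Dict.get?_empty,
        Option.none_or, pvAgo_eq]
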